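-- pv_equiv track=rewrite | github.com/ClarkSims/PythonGraphAlgorithms | demo_symetric_bfs.py | double_sided_breadth_first_search
-- ===== SOURCE A (Python) =====
-- def double_sided_breadth_first_search(undirected_graph, vertex0, vertex1):
--     boundary0 = {vertex0}
--     boundary1 = {vertex1}
--
--     #mark verticies
--     visited = {vertex0 : vertex0, vertex1 : vertex1}
--
--     distance = 0
--     common_vertex = None
--     while boundary0 and boundary1 and common_vertex is None:
--         distance += 1
--         if len(boundary0) <= len(boundary1):
--             common_vertex, boundary0, path_increment = expand_left_boundary(
--                 boundary0, boundary1, visited, undirected_graph, vertex0)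
--         else:
--             common_vertex, boundary1, path_increment = expand_left_boundary(
--                 boundary1, boundary0, visited, undirected_graph, vertex1)
--     if common_vertex:
--         return distance
--     raise ValueError( "{} is not connected to {}".format(vertex1,vertex0))
--
-- def expand_left_boundary(lhs_boundary, rhs_boundary, visited, directed_graph, lhs_vertex):
--     next_boundary = set()
--     common_vertex = None
--     for vertex in lhs_boundary:
--         for neighbor in directed_graph[vertex]:
--             if neighbor in visited:
--                 if visited[neighbor] != lhs_vertex:
--                     common_vertex = visited[neighbor]
--                     break
--             else:
--                 next_boundary.add(neighbor)
--                 visited[neighbor] = lhs_vertex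
--     path_increment = 1 if next_boundary else 0
--     return (common_vertex, next_boundary, path_increment)
-- ===== SOURCE B (Python) =====
-- def double_sided_breadth_first_search(undirected_graph, vertex0, vertex1):
--     # single-source BFS from vertex0; returns the distance at which vertex1
--     # is first discovered as a new neighbor
--     visited = {vertex0}
--     frontier = {vertex0}
--     distance = 0
--     while frontier:
--         distance += 1
--         next_frontier = set()
--         for v in frontier:
--             for n in undirected_graph[v]:
--                 if n not in visited:
--                     if n == vertex1:
--                         return distance
--                     visited.add(n)
--                     next_frontier.add(n)
--         frontier = next_frontier
--     raise ValueError("{} is not connected to {}".format(vertex1, vertex0))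
-- ===== Notes on version B (the rewrite author's own statement) =====
-- stated objective: simpler
-- what changed: Replaced the bidirectional (meet-in-the-middle) BFS with its two frontiers, shared ownership dict and truthiness-tested common vertex by a plain single-source BFS from vertex0 that returns the round at which vertex1 is first discovered.
-- outside the precondition, e.g. on double_sided_breadth_first_search({1: [2], 2: [1, 3]}, 1, 3): A returns 2, B returns 2; on double_sided_breadth_first_search({0: [1], 1: [0, 2], 2: [1]}, 0, 2): A returns 2, B returns 2; on double_sided_breadth_first_search({7: [1, 2], 1: [3], 2: [3], 9: [1], 3: []}, 7, 9): A returns 2, B raises ValueError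
import Mathlib
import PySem

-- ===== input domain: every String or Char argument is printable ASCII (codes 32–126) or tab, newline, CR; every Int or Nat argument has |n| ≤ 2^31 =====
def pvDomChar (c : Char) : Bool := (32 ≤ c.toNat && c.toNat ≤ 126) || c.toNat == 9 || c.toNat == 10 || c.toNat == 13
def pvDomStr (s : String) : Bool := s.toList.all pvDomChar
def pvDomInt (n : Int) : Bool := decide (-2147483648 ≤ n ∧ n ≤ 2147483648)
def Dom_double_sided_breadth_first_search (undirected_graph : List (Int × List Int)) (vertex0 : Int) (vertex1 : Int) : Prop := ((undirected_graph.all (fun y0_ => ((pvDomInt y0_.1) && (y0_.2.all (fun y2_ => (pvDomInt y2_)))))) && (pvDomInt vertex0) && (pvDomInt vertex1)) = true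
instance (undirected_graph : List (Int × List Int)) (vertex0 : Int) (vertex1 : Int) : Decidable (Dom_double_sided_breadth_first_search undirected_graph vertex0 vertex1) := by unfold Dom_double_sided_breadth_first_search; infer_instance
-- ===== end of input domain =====

-- B replaces A's bidirectional meet-in-the-middle BFS by a plain single-source BFS from
-- vertex0 (simpler: one frontier, one visited set, no shared ownership dict, no
-- truthiness-tested common vertex); equivalence is about the RETURN value on the stated Pre_.

-- ===== PORT A =====
-- shared input-reading helper: the Python parameter is a dict; lookup is dict lookup,
-- a missing key (Python KeyError) is read as [] (such inputs are outside Pre_)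
def pvAdj (g : List (Int × List Int)) : PySem.Dict Int (List Int) := PySem.Dict.ofList g
def pvNbrs (g : List (Int × List Int)) (v : Int) : List Int := ((pvAdj g).get? v).getD []

-- inner 'for neighbor in directed_graph[vertex]' loop of expand_left_boundary,
-- with its break (which leaves the OUTER loop running, as in the Python)
def pvExpandInner (lhs : Int) : List Int → Option Int → PySem.Set Int → PySem.Dict Int Int → Option Int × PySem.Set Int × PySem.Dict Int Int
  | [], c, nb, vis => (c, nb, vis)
  | n :: rest, c, nb, vis =>
    match vis.get? n with
    | some w => if w ≠ lhs then (some w, nb, vis)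
                else pvExpandInner lhs rest c nb vis
    | none => pvExpandInner lhs rest c (PySem.Set.add nb n) (vis.insert n lhs)

-- outer 'for vertex in lhs_boundary' loop (set iteration; the returned distance of A
-- does not depend on the iteration order, see the lemmas)
def pvExpandOuter (g : List (Int × List Int)) (lhs : Int) : List Int → Option Int → PySem.Set Int → PySem.Dict Int Int → Option Int × PySem.Set Int × PySem.Dict Int Int
  | [], c, nb, vis => (c, nb, vis)
  | v :: rest, c, nb, vis =>
    let r := pvExpandInner lhs (pvNbrs g v) c nb vis
    pvExpandOuter g lhs rest r.1 r.2.1 r.2.2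

-- expand_left_boundary (rhs_boundary is a parameter the Python never reads)
def pvExpandLeftBoundary (g : List (Int × List Int)) (lhs_boundary : PySem.Set Int) (_rhs_boundary : PySem.Set Int) (vis : PySem.Dict Int Int) (lhs_vertex : Int) : Option Int × PySem.Set Int × Int × PySem.Dict Int Int :=
  let r := pvExpandOuter g lhs_vertex lhs_boundary none PySem.Set.empty vis
  (r.1, r.2.1, (if r.2.1 = [] then (0:Int) else 1), r.2.2)

-- the while loop; fuel makes it total, |graph|+1 rounds always suffice under Pre_;
-- every 'raise ValueError' path returns the junk value -1 (outside Pre_)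
def pvLoopA (g : List (Int × List Int)) (v0 v1 : Int) : Nat → PySem.Set Int → PySem.Set Int → PySem.Dict Int Int → Int → Option Int → Int
  | 0, _, _, _, _, _ => -1
  | fuel+1, b0, b1, vis, dist, common =>
    if b0 ≠ [] ∧ b1 ≠ [] ∧ common = none then
      if PySem.Set.len b0 ≤ PySem.Set.len b1 then
        let r := pvExpandLeftBoundary g b0 b1 vis v0
        pvLoopA g v0 v1 fuel r.2.1 b1 r.2.2.2 (dist+1) r.1
      else
        let r := pvExpandLeftBoundary g b1 b0 vis v1
        pvLoopA g v0 v1 fuel b0 r.2.1 r.2.2.2 (dist+1) r.1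
    else
      match common with
      | some c => if c ≠ 0 then dist else -1   -- 'if common_vertex:' (0 and None are falsy)
      | none => -1

def double_sided_breadth_first_search (undirected_graph : List (Int × List Int)) (vertex0 : Int) (vertex1 : Int) : Int :=
  pvLoopA undirected_graph vertex0 vertex1 (undirected_graph.length + 1)
    (PySem.Set.ofList [vertex0]) (PySem.Set.ofList [vertex1])
    (PySem.Dict.ofList [(vertex0, vertex0), (vertex1, vertex1)]) 0 none

-- ===== PORT B =====
-- inner 'for n in undirected_graph[v]' loop; none = the 'return distance' of B
def pvBfsInner (v1 : Int) : List Int → PySem.Set Int → PySem.Set Int → Option (PySem.Set Int × PySem.Set Int)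
  | [], vis, nf => some (vis, nf)
  | n :: rest, vis, nf =>
    if PySem.Set.contains vis n then pvBfsInner v1 rest vis nf
    else if n = v1 then none
    else pvBfsInner v1 rest (PySem.Set.add vis n) (PySem.Set.add nf n)

-- outer 'for v in frontier' loop
def pvBfsOuter (g : List (Int × List Int)) (v1 : Int) : List Int → PySem.Set Int → PySem.Set Int → Option (PySem.Set Int × PySem.Set Int)
  | [], vis, nf => some (vis, nf)
  | v :: rest, vis, nf =>
    match pvBfsInner v1 (pvNbrs g v) vis nf with
    | none => none
    | some r => pvBfsOuter g v1 rest r.1 r.2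

-- B's while loop; fuel for totality, -1 = the 'raise ValueError' path (outside Pre_)
def pvLoopB (g : List (Int × List Int)) (v1 : Int) : Nat → PySem.Set Int → PySem.Set Int → Int → Int
  | 0, _, _, _ => -1
  | fuel+1, frontier, vis, dist =>
    if frontier ≠ [] then
      match pvBfsOuter g v1 frontier vis PySem.Set.empty with
      | none => dist + 1
      | some r => pvLoopB g v1 fuel r.2 r.1 (dist + 1)
    else -1

def double_sided_breadth_first_search_alt (undirected_graph : List (Int × List Int)) (vertex0 : Int) (vertex1 : Int) : Int :=
  pvLoopB undirected_graph vertex1 (undirected_graph.length + 1)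
    (PySem.Set.ofList [vertex0]) (PySem.Set.ofList [vertex0]) 0

-- ===== PRECONDITION & SPEC =====
-- reachable set of vertex0 after k expansion rounds (used only to state connectivity)
def pvStep (g : List (Int × List Int)) (S : PySem.Set Int) : PySem.Set Int :=
  PySem.Set.update S (S.flatMap (pvNbrs g))
def pvReachN (g : List (Int × List Int)) (s : Int) : Nat → PySem.Set Int
  | 0 => PySem.Set.ofList [s]
  | k+1 => pvStep g (pvReachN g s k)

-- Pre_ admits (a) the directly-checkable case 'vertex1 is listed as a neighbour of
-- vertex0' (A always returns 1 there, on any graph), and (b) the function's stated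
-- use case: a key-closed, symmetric (undirected) adjacency with vertex1 reachable
-- from vertex0. It excludes the inputs where A raises (KeyError on a missing key,
-- ValueError when the search exhausts or when A's 'if common_vertex:' truthiness
-- test fires because the detected endpoint is 0) and the non-symmetric multi-step
-- searches, where the bidirectional meet count is not a checkable input property.
def Pre_double_sided_breadth_first_search (undirected_graph : List (Int × List Int)) (vertex0 : Int) (vertex1 : Int) : Prop :=
  vertex0 ≠ vertex1 ∧ vertex1 ≠ 0 ∧
  (vertex1 ∈ pvNbrs undirected_graph vertex0 ∨
    (vertex0 ≠ 0 ∧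
     vertex0 ∈ (pvAdj undirected_graph).keys ∧ vertex1 ∈ (pvAdj undirected_graph).keys ∧
     (∀ p ∈ (pvAdj undirected_graph).items, ∀ n ∈ p.2,
        n ∈ (pvAdj undirected_graph).keys ∧ p.1 ∈ pvNbrs undirected_graph n) ∧
     vertex1 ∈ pvReachN undirected_graph vertex0 undirected_graph.length))
instance (undirected_graph : List (Int × List Int)) (vertex0 : Int) (vertex1 : Int) : Decidable (Pre_double_sided_breadth_first_search undirected_graph vertex0 vertex1) := by unfold Pre_double_sided_breadth_first_search; infer_instance

def pvWitness_double_sided_breadth_first_search : (List (Int × List Int)) × Int × Int :=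
  ([(1, [2]), (2, [1, 3]), (3, [2])], 1, 3)

def Spec_double_sided_breadth_first_search (undirected_graph : List (Int × List Int)) (vertex0 : Int) (vertex1 : Int) (out : Int) : Prop := out = double_sided_breadth_first_search_alt undirected_graph vertex0 vertex1
instance (undirected_graph : List (Int × List Int)) (vertex0 : Int) (vertex1 : Int) (out : Int) : Decidable (Spec_double_sided_breadth_first_search undirected_graph vertex0 vertex1 out) := by unfold Spec_double_sided_breadth_first_search; infer_instance

-- ===== CLAIM (what is proved, stated in full; the proofs are below) =====
def Claim_equal_double_sided_breadth_first_search : Prop := ∀ (undirected_graph : List (Int × List Int)) (vertex0 : Int) (vertex1 : Int), Dom_double_sided_breadth_first_search undirected_graph vertex0 vertex1 → Pre_double_sided_breadth_first_search undirected_graph vertex0 vertex1 → Spec_double_sided_breadth_first_search undirected_graph vertex0 vertex1 (double_sided_breadth_first_search undirected_graph vertex0 vertex1)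

-- ===== LEMMAS AND PROOFS =====
-- ---- reachability balls: pvReachN g s k = vertices within k steps of s ----
lemma pv_mem_step {g : List (Int × List Int)} {S : PySem.Set Int} {x : Int} :
    x ∈ pvStep g S ↔ x ∈ S ∨ ∃ u ∈ S, x ∈ pvNbrs g u := by
  simp [pvStep, PySem.Set.mem_update, List.mem_flatMap]

lemma pv_mem_ball_zero {g : List (Int × List Int)} {s x : Int} :
    x ∈ pvReachN g s 0 ↔ x = s := by
  simp [pvReachN, PySem.Set.ofList, PySem.Set.add, PySem.Set.empty]

lemma pv_ball_succ {g : List (Int × List Int)} {s x : Int} {k : Nat} :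
    x ∈ pvReachN g s (k+1) ↔ x ∈ pvReachN g s k ∨ ∃ u ∈ pvReachN g s k, x ∈ pvNbrs g u := by
  simp [pvReachN, pv_mem_step]

lemma pv_ball_mono_succ {g : List (Int × List Int)} {s x : Int} {k : Nat}
    (h : x ∈ pvReachN g s k) : x ∈ pvReachN g s (k+1) :=
  pv_ball_succ.2 (Or.inl h)

lemma pv_ball_mono {g : List (Int × List Int)} {s x : Int} {k m : Nat} (hkm : k ≤ m)
    (h : x ∈ pvReachN g s k) : x ∈ pvReachN g s m := by
  induction m with
  | zero => exact (Nat.le_zero.mp hkm) ▸ h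
  | succ m ih =>
    rcases Nat.lt_or_ge m k with hlt | hge
    · have : k = m + 1 := by omega
      exact this ▸ h
    · exact pv_ball_mono_succ (ih hge)

lemma pv_ball_self {g : List (Int × List Int)} {s : Int} (k : Nat) : s ∈ pvReachN g s k :=
  pv_ball_mono (Nat.zero_le k) (pv_mem_ball_zero.2 rfl)

lemma pv_ball_shift {g : List (Int × List Int)} {x u y : Int} {b : Nat}
    (he : u ∈ pvNbrs g x) (h : y ∈ pvReachN g u b) : y ∈ pvReachN g x (b+1) := by
  induction b generalizing y with
  | zero =>
    have := pv_mem_ball_zero.mp h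
    subst this
    exact pv_ball_succ.2 (Or.inr ⟨x, pv_mem_ball_zero.2 rfl, he⟩)
  | succ b ih =>
    rcases pv_ball_succ.mp h with h' | ⟨w, hw, hyw⟩
    · exact pv_ball_mono_succ (ih h')
    · exact pv_ball_succ.2 (Or.inr ⟨w, ih hw, hyw⟩)

lemma pv_ball_trans {g : List (Int × List Int)} {s x y : Int} {a b : Nat}
    (hx : x ∈ pvReachN g s a) (hy : y ∈ pvReachN g x b) : y ∈ pvReachN g s (a+b) := by
  induction b generalizing y with
  | zero => exact (pv_mem_ball_zero.mp hy) ▸ hx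
  | succ b ih =>
    rcases pv_ball_succ.mp hy with h' | ⟨w, hw, hyw⟩
    · exact pv_ball_mono (by omega) (ih h')
    · exact pv_ball_succ.2 (Or.inr ⟨w, ih hw, hyw⟩)

lemma pv_ball_sym {g : List (Int × List Int)}
    (hsym : ∀ u n, n ∈ pvNbrs g u → u ∈ pvNbrs g n) {x y : Int} {b : Nat}
    (h : x ∈ pvReachN g y b) : y ∈ pvReachN g x b := by
  induction b generalizing x with
  | zero => exact (pv_mem_ball_zero.mp h) ▸ pv_mem_ball_zero.2 rfl
  | succ b ih =>
    rcases pv_ball_succ.mp h with h' | ⟨u, hu, hxu⟩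
    · exact pv_ball_mono_succ (ih h')
    · exact pv_ball_shift (hsym u x hxu) (ih hu)

lemma pv_ball_decomp {g : List (Int × List Int)} {s y : Int} {a b : Nat}
    (h : y ∈ pvReachN g s (a+b)) : ∃ x, x ∈ pvReachN g s a ∧ y ∈ pvReachN g x b := by
  induction b generalizing y with
  | zero => exact ⟨y, h, pv_mem_ball_zero.2 rfl⟩
  | succ b ih =>
    rcases pv_ball_succ.mp h with h' | ⟨w, hw, hyw⟩
    · rcases ih h' with ⟨x, hx, hyx⟩
      exact ⟨x, hx, pv_ball_mono_succ hyx⟩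
    · rcases ih hw with ⟨x, hx, hwx⟩
      exact ⟨x, hx, pv_ball_succ.2 (Or.inr ⟨w, hwx, hyw⟩)⟩

lemma pv_ball_stagnate {g : List (Int × List Int)} {s : Int} {k : Nat}
    (h : ∀ x, x ∈ pvReachN g s (k+1) → x ∈ pvReachN g s k) :
    ∀ m x, x ∈ pvReachN g s (k+m) → x ∈ pvReachN g s k := by
  intro m
  induction m with
  | zero => exact fun x hx => hx
  | succ m ih =>
    intro x hx
    rcases pv_ball_succ.mp hx with h' | ⟨u, hu, hxu⟩
    · exact ih x h'
    · exact h x (pv_ball_succ.2 (Or.inr ⟨u, ih u hu, hxu⟩))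

-- ---- facts derived from Pre_: neighbour lists come from dict entries; symmetry ----
lemma pv_nbrs_mem {g : List (Int × List Int)} {u n : Int} (h : n ∈ pvNbrs g u) :
    ∃ l, (pvAdj g).get? u = some l ∧ n ∈ l := by
  cases hget : (pvAdj g).get? u with
  | none => simp [pvNbrs, hget] at h
  | some l => exact ⟨l, rfl, by simpa [pvNbrs, hget] using h⟩

lemma pv_pre_sym {g : List (Int × List Int)}
    (hclose : ∀ p ∈ (pvAdj g).items, ∀ n ∈ p.2,
      n ∈ (pvAdj g).keys ∧ p.1 ∈ pvNbrs g n) :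
    ∀ u n, n ∈ pvNbrs g u → u ∈ pvNbrs g n := by
  intro u n h
  rcases pv_nbrs_mem h with ⟨l, hget, hn⟩
  exact (hclose (u, l) (PySem.Dict.mem_items_of_get?_eq_some (pvAdj g) hget) n hn).2

-- ---- characterisation of B's inner and outer frontier-expansion loops ----
lemma pv_bfsInner_none_iff {v1 : Int} {ns : List Int} {V F : PySem.Set Int}
    (hv1 : v1 ∉ V) : pvBfsInner v1 ns V F = none ↔ v1 ∈ ns := by
  induction ns generalizing V F with
  | nil => simp [pvBfsInner]
  | cons n rest ih =>
    by_cases hn : n ∈ V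
    · have hne : v1 ≠ n := fun h => hv1 (h ▸ hn)
      simp [pvBfsInner, hn, ih hv1, hne]
    · by_cases hv : n = v1
      · simp [pvBfsInner, hn, hv]
        exact fun h => absurd h (hv ▸ hn)
      · have hv1' : v1 ∉ PySem.Set.add V n := by
          rw [PySem.Set.mem_add]
          rintro (h | h)
          exacts [hv1 h, hv h.symm]
        have hne : (v1 = n) ↔ False := ⟨fun h => hv h.symm, False.elim⟩
        have hrec := ih (V := PySem.Set.add V n) (F := PySem.Set.add F n) hv1'
        simp [pvBfsInner, hn, hv, hne] at hrec ⊢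
        exact hrec

lemma pv_bfsInner_some {v1 : Int} {ns : List Int} {V F : PySem.Set Int}
    (hv1 : v1 ∉ ns) :
    ∃ V' F', pvBfsInner v1 ns V F = some (V', F') ∧
      (∀ x, x ∈ V' ↔ x ∈ V ∨ x ∈ ns) ∧
      (∀ x, x ∈ F' ↔ x ∈ F ∨ (x ∈ ns ∧ x ∉ V)) := by
  induction ns generalizing V F with
  | nil => exact ⟨V, F, by simp [pvBfsInner], by simp, by simp⟩
  | cons n rest ih =>
    have hv1r : v1 ∉ rest := fun h => hv1 (List.mem_cons_of_mem _ h)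
    by_cases hn : n ∈ V
    · rcases ih (V := V) (F := F) hv1r with ⟨V', F', heq, hV, hF⟩
      refine ⟨V', F', ?_, ?_, ?_⟩
      · simpa [pvBfsInner, hn] using heq
      · intro x
        rw [hV x]
        simp only [List.mem_cons]
        constructor
        · rintro (h | h); exacts [Or.inl h, Or.inr (Or.inr h)]
        · rintro (h | rfl | h)
          exacts [Or.inl h, Or.inl hn, Or.inr h]
      · intro x
        rw [hF x]
        simp only [List.mem_cons]
        constructor
        · rintro (h | ⟨h1, h2⟩); exacts [Or.inl h, Or.inr ⟨Or.inr h1, h2⟩]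
        · rintro (h | ⟨rfl | h1, h2⟩)
          exacts [Or.inl h, absurd hn h2, Or.inr ⟨h1, h2⟩]
    · have hnv1 : ¬ n = v1 := fun h => hv1 (h ▸ List.mem_cons_self ..)
      rcases ih (V := PySem.Set.add V n) (F := PySem.Set.add F n) hv1r with ⟨V', F', heq, hV, hF⟩
      refine ⟨V', F', by simpa [pvBfsInner, hn, hnv1] using heq, ?_, ?_⟩
      · intro x
        rw [hV x]
        simp only [PySem.Set.mem_add, List.mem_cons]
        tauto
      · intro x
        rw [hF x]
        simp only [PySem.Set.mem_add, List.mem_cons]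
        by_cases hx : x = n
        · subst hx; tauto
        · tauto

lemma pv_bfsOuter_none_iff {g : List (Int × List Int)} {v1 : Int} {vs : List Int}
    {V F : PySem.Set Int} (hv1 : v1 ∉ V) :
    pvBfsOuter g v1 vs V F = none ↔ ∃ v ∈ vs, v1 ∈ pvNbrs g v := by
  induction vs generalizing V F with
  | nil => simp [pvBfsOuter]
  | cons v rest ih =>
    by_cases hv : v1 ∈ pvNbrs g v
    · have h0 : pvBfsInner v1 (pvNbrs g v) V F = none := (pv_bfsInner_none_iff hv1).2 hv
      refine ⟨fun _ => ⟨v, List.mem_cons_self .., hv⟩, fun _ => ?_⟩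
      simp [pvBfsOuter, h0]
    · rcases pv_bfsInner_some (V := V) (F := F) hv with ⟨V', F', heq, hV, hF⟩
      have hv1' : v1 ∉ V' := by
        rw [hV v1]; rintro (h | h); exacts [hv1 h, hv h]
      simp only [pvBfsOuter, heq, ih hv1', List.mem_cons]
      constructor
      · rintro ⟨w, hw, hnw⟩; exact ⟨w, Or.inr hw, hnw⟩
      · rintro ⟨w, hw | hw, hnw⟩
        exacts [absurd (hw ▸ hnw) hv, ⟨w, hw, hnw⟩]

lemma pv_bfsOuter_some {g : List (Int × List Int)} {v1 : Int} {vs : List Int}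
    {V F : PySem.Set Int} (hv1 : v1 ∉ V) (hnohit : ¬ ∃ v ∈ vs, v1 ∈ pvNbrs g v) :
    ∃ V' F', pvBfsOuter g v1 vs V F = some (V', F') ∧
      (∀ x, x ∈ V' ↔ x ∈ V ∨ ∃ v ∈ vs, x ∈ pvNbrs g v) ∧
      (∀ x, x ∈ F' ↔ x ∈ F ∨ ((∃ v ∈ vs, x ∈ pvNbrs g v) ∧ x ∉ V)) := by
  induction vs generalizing V F with
  | nil => exact ⟨V, F, by simp [pvBfsOuter], by simp, by simp⟩
  | cons v rest ih =>
    have hv : v1 ∉ pvNbrs g v := fun h => hnohit ⟨v, List.mem_cons_self .., h⟩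
    have hrest : ¬ ∃ w ∈ rest, v1 ∈ pvNbrs g w :=
      fun ⟨w, hw, h⟩ => hnohit ⟨w, List.mem_cons_of_mem _ hw, h⟩
    rcases pv_bfsInner_some (V := V) (F := F) hv with ⟨V1, F1, heq, hV1, hF1⟩
    have hv1' : v1 ∉ V1 := by
      rw [hV1 v1]; rintro (h | h); exacts [hv1 h, hv h]
    rcases ih (V := V1) (F := F1) hv1' hrest with ⟨V', F', heq', hV', hF'⟩
    refine ⟨V', F', by simp [pvBfsOuter, heq, heq'], ?_, ?_⟩
    · intro x
      rw [hV' x]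
      have h1 := hV1 x
      simp only [List.mem_cons]
      constructor
      · rintro (h | ⟨w, hw, hx⟩)
        · rcases h1.1 h with h | h
          exacts [Or.inl h, Or.inr ⟨v, Or.inl rfl, h⟩]
        · exact Or.inr ⟨w, Or.inr hw, hx⟩
      · rintro (h | ⟨w, hw | hw, hx⟩)
        exacts [Or.inl (h1.2 (Or.inl h)), Or.inl (h1.2 (Or.inr (hw ▸ hx))),
          Or.inr ⟨w, hw, hx⟩]
    · intro x
      rw [hF' x]
      have h1 := hV1 x
      have h2 := hF1 x
      simp only [List.mem_cons]
      constructor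
      · rintro (h | ⟨⟨w, hw, hx⟩, hxv⟩)
        · rcases h2.1 h with h | ⟨h3, h4⟩
          exacts [Or.inl h, Or.inr ⟨⟨v, Or.inl rfl, h3⟩, h4⟩]
        · have hxv' : x ∉ V := fun h => hxv (h1.2 (Or.inl h))
          exact Or.inr ⟨⟨w, Or.inr hw, hx⟩, hxv'⟩
      · rintro (h | ⟨⟨w, hw | hw, hx⟩, hxv⟩)
        · exact Or.inl (h2.2 (Or.inl h))
        · exact Or.inl (h2.2 (Or.inr ⟨hw ▸ hx, hxv⟩))
        · by_cases hxV1 : x ∈ V1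
          · rcases h1.1 hxV1 with h | h
            exacts [absurd h hxv, Or.inl (h2.2 (Or.inr ⟨h, hxv⟩))]
          · exact Or.inr ⟨⟨w, hw, hx⟩, hxV1⟩

-- ---- a nonempty sphere: while the target is unreached, the current BFS shell is nonempty ----
lemma pv_sphere_ne {g : List (Int × List Int)} {s t : Int} {Dt r : Nat} {S : PySem.Set Int}
    (hS : ∀ x, x ∈ S ↔ x ∈ pvReachN g s r ∧ ∀ j, j < r → x ∉ pvReachN g s j)
    (ht : t ∈ pvReachN g s Dt) (hmin : ∀ j, j < Dt → t ∉ pvReachN g s j)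
    (hr : r < Dt) : S ≠ [] := by
  intro hFe
  cases r with
  | zero =>
    have : s ∈ S := (hS s).2 ⟨pv_ball_self 0, fun j hj => absurd hj (Nat.not_lt_zero j)⟩
    rw [hFe] at this
    exact absurd this (List.not_mem_nil)
  | succ rr =>
    have hstab : ∀ x, x ∈ pvReachN g s (rr+1) → x ∈ pvReachN g s rr := by
      intro x hx
      by_cases hxe : ∃ j, j < rr + 1 ∧ x ∈ pvReachN g s j
      · obtain ⟨j, hj, hxj⟩ := hxe
        exact pv_ball_mono (by omega) hxj
      · push_neg at hxe
        have : x ∈ S := (hS x).2 ⟨hx, hxe⟩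
        rw [hFe] at this
        exact absurd this (List.not_mem_nil)
    have hst := pv_ball_stagnate (k := rr) hstab (Dt - rr) t
    rw [Nat.add_sub_cancel' (by omega)] at hst
    exact hmin rr (by omega) (hst ht)

-- ---- B's while loop returns the BFS distance D ----
lemma pv_loopB_correct {g : List (Int × List Int)} {v0 v1 : Int} {D : Nat}
    (hD : v1 ∈ pvReachN g v0 D) (hmin : ∀ j, j < D → v1 ∉ pvReachN g v0 j) :
    ∀ fuel r (V F : PySem.Set Int),
      (∀ x, x ∈ V ↔ x ∈ pvReachN g v0 r) →
      (∀ x, x ∈ F ↔ x ∈ pvReachN g v0 r ∧ ∀ j, j < r → x ∉ pvReachN g v0 j) →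
      r < D → D ≤ fuel + r →
      pvLoopB g v1 fuel F V (r : Int) = (D : Int) := by
  intro fuel
  induction fuel with
  | zero => intro r V F _ _ hr hf; omega
  | succ fuel ih =>
    intro r V F hV hF hr hfuel
    have hFne : F ≠ [] := pv_sphere_ne hF hD hmin hr
    have hv1V : v1 ∉ V := fun h => hmin r hr ((hV v1).1 h)
    by_cases hhit : ∃ v ∈ F, v1 ∈ pvNbrs g v
    · have hnone := (pv_bfsOuter_none_iff (F := PySem.Set.empty) hv1V).2 hhit
      have hD1 : D = r + 1 := by
        obtain ⟨v, hvF, hn⟩ := hhit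
        have hv' : v ∈ pvReachN g v0 r := ((hF v).1 hvF).1
        have hv1r : v1 ∈ pvReachN g v0 (r+1) := pv_ball_succ.2 (Or.inr ⟨v, hv', hn⟩)
        by_contra hne
        exact hmin (r+1) (by omega) hv1r
      simp only [pvLoopB, if_pos hFne, hnone]
      omega
    · obtain ⟨V', F', heq, hV', hF'⟩ := pv_bfsOuter_some (F := PySem.Set.empty) hv1V hhit
      have hDgt : r + 1 < D := by
        rcases Nat.lt_or_ge (r+1) D with h | h
        · exact h
        · exfalso
          have hD1 : D = r + 1 := by omega
          have hv1r1 : v1 ∈ pvReachN g v0 (r+1) := hD1 ▸ hD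
          rcases pv_ball_succ.mp hv1r1 with h' | ⟨u, hu, hn⟩
          · exact hmin r hr h'
          · have huF : u ∈ F := (hF u).2 ⟨hu, fun j hj hxj =>
              hmin (j+1) (by omega) (pv_ball_succ.2 (Or.inr ⟨u, hxj, hn⟩))⟩
            exact hhit ⟨u, huF, hn⟩
      have hVnew : ∀ x, x ∈ V' ↔ x ∈ pvReachN g v0 (r+1) := by
        intro x
        rw [hV' x]
        constructor
        · rintro (h | ⟨v, hv, hx⟩)
          · exact pv_ball_mono_succ ((hV x).1 h)
          · exact pv_ball_succ.2 (Or.inr ⟨v, ((hF v).1 hv).1, hx⟩)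
        · intro h
          rcases pv_ball_succ.mp h with h' | ⟨u, hu, hx⟩
          · exact Or.inl ((hV x).2 h')
          · by_cases hxr : x ∈ pvReachN g v0 r
            · exact Or.inl ((hV x).2 hxr)
            · refine Or.inr ⟨u, (hF u).2 ⟨hu, ?_⟩, hx⟩
              intro j hj huj
              exact hxr (pv_ball_mono (by omega) (pv_ball_succ.2 (Or.inr ⟨u, huj, hx⟩)))
      have hFnew : ∀ x, x ∈ F' ↔ x ∈ pvReachN g v0 (r+1) ∧ ∀ j, j < r+1 → x ∉ pvReachN g v0 j := by
        intro x
        rw [hF' x]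
        constructor
        · rintro (h | ⟨⟨v, hv, hx⟩, hxV⟩)
          · exact absurd h (List.not_mem_nil)
          · refine ⟨pv_ball_succ.2 (Or.inr ⟨v, ((hF v).1 hv).1, hx⟩), ?_⟩
            intro j hj hxj
            exact hxV ((hV x).2 (pv_ball_mono (by omega) hxj))
        · rintro ⟨hx, hnot⟩
          have hxr : x ∉ pvReachN g v0 r := hnot r (by omega)
          rcases pv_ball_succ.mp hx with h' | ⟨u, hu, hxn⟩
          · exact absurd h' hxr
          · refine Or.inr ⟨⟨u, (hF u).2 ⟨hu, ?_⟩, hxn⟩, fun h => hxr ((hV x).1 h)⟩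
            intro j hj huj
            exact hnot (j+1) (by omega) (pv_ball_succ.2 (Or.inr ⟨u, huj, hxn⟩))
      have hres := ih (r+1) V' F' hVnew hFnew hDgt (by omega)
      simp only [pvLoopB, if_pos hFne, heq]
      push_cast at hres ⊢
      exact hres

-- ---- characterisation of A's expand_left_boundary loops ----
-- stability: common stays c or becomes some c0; visited values stay in {lhs, c0};
-- existing entries are never overwritten
lemma pv_expInner_stable {lhs c0 : Int} {ns : List Int} {c : Option Int} {nb : PySem.Set Int}
    {vis : PySem.Dict Int Int}
    (htri : ∀ n w, vis.get? n = some w → w = lhs ∨ w = c0) :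
    ((pvExpandInner lhs ns c nb vis).1 = c ∨ (pvExpandInner lhs ns c nb vis).1 = some c0) ∧
    (∀ n w, (pvExpandInner lhs ns c nb vis).2.2.get? n = some w → w = lhs ∨ w = c0) ∧
    (∀ n w, vis.get? n = some w → (pvExpandInner lhs ns c nb vis).2.2.get? n = some w) := by
  induction ns generalizing c nb vis with
  | nil => exact ⟨Or.inl rfl, htri, fun _ _ h => h⟩
  | cons n rest ih =>
    cases hg : vis.get? n with
    | some w =>
      by_cases hw : w = lhs
      · rw [hw] at hg
        have hstep : pvExpandInner lhs (n::rest) c nb vis = pvExpandInner lhs rest c nb vis := by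
          simp [pvExpandInner, hg]
        rw [hstep]
        exact ih htri
      · have hw0 : w = c0 := (htri n w hg).resolve_left hw
        have hstep : pvExpandInner lhs (n::rest) c nb vis = (some w, nb, vis) := by
          simp [pvExpandInner, hg, hw]
        rw [hstep]
        exact ⟨Or.inr (by rw [hw0]), htri, fun _ _ h => h⟩
    | none =>
      have htri' : ∀ m w, (vis.insert n lhs).get? m = some w → w = lhs ∨ w = c0 := by
        intro m w h
        rw [PySem.Dict.get?_insert] at h
        by_cases hm : m = n
        · rw [if_pos hm] at h
          exact Or.inl (Option.some_injective _ h).symm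
        · exact htri m w (by rwa [if_neg hm] at h)
      have hstep : pvExpandInner lhs (n::rest) c nb vis
          = pvExpandInner lhs rest c (PySem.Set.add nb n) (vis.insert n lhs) := by
        simp [pvExpandInner, hg]
      rw [hstep]
      have h3 := ih (c := c) (nb := PySem.Set.add nb n) htri'
      refine ⟨h3.1, h3.2.1, ?_⟩
      intro m w h
      have hmn : m ≠ n := fun he => by rw [he, hg] at h; simp at h
      exact h3.2.2 m w (by rw [PySem.Dict.get?_insert, if_neg hmn]; exact h)

-- if some listed neighbour is owned by the other side, common ends as some c0
lemma pv_expInner_hit {lhs c0 : Int} {ns : List Int} {c : Option Int} {nb : PySem.Set Int}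
    {vis : PySem.Dict Int Int}
    (htri : ∀ n w, vis.get? n = some w → w = lhs ∨ w = c0) (hne : c0 ≠ lhs)
    (hhit : ∃ n ∈ ns, vis.get? n = some c0) :
    (pvExpandInner lhs ns c nb vis).1 = some c0 := by
  induction ns generalizing c nb vis with
  | nil => obtain ⟨n, hn, _⟩ := hhit; exact absurd hn (List.not_mem_nil)
  | cons n rest ih =>
    obtain ⟨m, hm, hgm⟩ := hhit
    cases hg : vis.get? n with
    | some w =>
      by_cases hw : w = lhs
      · rw [hw] at hg
        have hmr : m ∈ rest := by
          rcases List.mem_cons.mp hm with rfl | h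
          · rw [hg] at hgm
            exact absurd (Option.some_injective _ hgm).symm hne
          · exact h
        have hstep : pvExpandInner lhs (n::rest) c nb vis = pvExpandInner lhs rest c nb vis := by
          simp [pvExpandInner, hg]
        rw [hstep]
        exact ih htri ⟨m, hmr, hgm⟩
      · have hw0 : w = c0 := (htri n w hg).resolve_left hw
        have hstep : pvExpandInner lhs (n::rest) c nb vis = (some w, nb, vis) := by
          simp [pvExpandInner, hg, hw]
        rw [hstep, hw0]
    | none =>
      have hmr : m ∈ rest := by
        rcases List.mem_cons.mp hm with rfl | h
        · rw [hg] at hgm; simp at hgm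
        · exact h
      have htri' : ∀ m' w, (vis.insert n lhs).get? m' = some w → w = lhs ∨ w = c0 := by
        intro m' w h
        rw [PySem.Dict.get?_insert] at h
        by_cases hm' : m' = n
        · rw [if_pos hm'] at h
          exact Or.inl (Option.some_injective _ h).symm
        · exact htri m' w (by rwa [if_neg hm'] at h)
      have hmn : m ≠ n := fun he => by rw [he, hg] at hgm; simp at hgm
      have hgm' : (vis.insert n lhs).get? m = some c0 := by
        rw [PySem.Dict.get?_insert, if_neg hmn]; exact hgm
      have hstep : pvExpandInner lhs (n::rest) c nb vis
          = pvExpandInner lhs rest c (PySem.Set.add nb n) (vis.insert n lhs) := by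
        simp [pvExpandInner, hg]
      rw [hstep]
      exact ih htri' ⟨m, hmr, hgm'⟩

-- if no listed neighbour is owned by the other side, common is unchanged and the
-- new entries / new boundary are exactly the unvisited listed neighbours
lemma pv_expInner_nohit {lhs : Int} {ns : List Int} {c : Option Int} {nb : PySem.Set Int}
    {vis : PySem.Dict Int Int}
    (hno : ∀ n ∈ ns, ∀ w, vis.get? n = some w → w = lhs) :
    (pvExpandInner lhs ns c nb vis).1 = c ∧
    (∀ x, (pvExpandInner lhs ns c nb vis).2.2.get? x =
      if x ∈ ns ∧ vis.get? x = none then some lhs else vis.get? x) ∧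
    (∀ x, x ∈ (pvExpandInner lhs ns c nb vis).2.1 ↔ x ∈ nb ∨ (x ∈ ns ∧ vis.get? x = none)) := by
  induction ns generalizing c nb vis with
  | nil => exact ⟨rfl, fun x => by simp [pvExpandInner], fun x => by simp [pvExpandInner]⟩
  | cons n rest ih =>
    cases hg : vis.get? n with
    | some w =>
      have hw : w = lhs := hno n (List.mem_cons_self ..) w hg
      rw [hw] at hg
      have hstep : pvExpandInner lhs (n::rest) c nb vis = pvExpandInner lhs rest c nb vis := by
        simp [pvExpandInner, hg]
      rw [hstep]
      have hrest := ih (c := c) (nb := nb)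
        (fun m hm w' h => hno m (List.mem_cons_of_mem _ hm) w' h)
      refine ⟨hrest.1, ?_, ?_⟩
      · intro x
        rw [hrest.2.1 x]
        by_cases hx : x = n
        · subst hx
          simp [hg]
        · simp [List.mem_cons, hx]
      · intro x
        rw [hrest.2.2 x]
        by_cases hx : x = n
        · subst hx
          simp [hg]
        · simp [List.mem_cons, hx]
    | none =>
      have hno' : ∀ m ∈ rest, ∀ w, (vis.insert n lhs).get? m = some w → w = lhs := by
        intro m hm w h
        rw [PySem.Dict.get?_insert] at h
        by_cases hmn : m = n
        · rw [if_pos hmn] at h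
          exact (Option.some_injective _ h).symm
        · exact hno m (List.mem_cons_of_mem _ hm) w (by rwa [if_neg hmn] at h)
      have hstep : pvExpandInner lhs (n::rest) c nb vis
          = pvExpandInner lhs rest c (PySem.Set.add nb n) (vis.insert n lhs) := by
        simp [pvExpandInner, hg]
      rw [hstep]
      have hrest := ih (c := c) (nb := PySem.Set.add nb n) hno'
      refine ⟨hrest.1, ?_, ?_⟩
      · intro x
        rw [hrest.2.1 x]
        by_cases hx : x = n
        · subst hx
          simp [PySem.Dict.get?_insert, hg, List.mem_cons]
        · rw [PySem.Dict.get?_insert, if_neg hx]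
          simp [List.mem_cons, hx]
      · intro x
        rw [hrest.2.2 x]
        by_cases hx : x = n
        · subst hx
          simp [PySem.Set.mem_add, PySem.Dict.get?_insert, hg, List.mem_cons]
        · rw [PySem.Dict.get?_insert, if_neg hx]
          simp [PySem.Set.mem_add, List.mem_cons, hx]

lemma pv_expOuter_stable {g : List (Int × List Int)} {lhs c0 : Int} {vs : List Int}
    {c : Option Int} {nb : PySem.Set Int} {vis : PySem.Dict Int Int}
    (htri : ∀ n w, vis.get? n = some w → w = lhs ∨ w = c0) :
    ((pvExpandOuter g lhs vs c nb vis).1 = c ∨ (pvExpandOuter g lhs vs c nb vis).1 = some c0) ∧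
    (∀ n w, (pvExpandOuter g lhs vs c nb vis).2.2.get? n = some w → w = lhs ∨ w = c0) ∧
    (∀ n w, vis.get? n = some w → (pvExpandOuter g lhs vs c nb vis).2.2.get? n = some w) := by
  induction vs generalizing c nb vis with
  | nil => exact ⟨Or.inl rfl, htri, fun _ _ h => h⟩
  | cons v rest ih =>
    have hI := pv_expInner_stable (c0 := c0) (lhs := lhs) (ns := pvNbrs g v)
      (c := c) (nb := nb) htri
    have hstep : pvExpandOuter g lhs (v::rest) c nb vis
        = pvExpandOuter g lhs rest (pvExpandInner lhs (pvNbrs g v) c nb vis).1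
            (pvExpandInner lhs (pvNbrs g v) c nb vis).2.1
            (pvExpandInner lhs (pvNbrs g v) c nb vis).2.2 := rfl
    rw [hstep]
    have ihres := ih (c := (pvExpandInner lhs (pvNbrs g v) c nb vis).1)
      (nb := (pvExpandInner lhs (pvNbrs g v) c nb vis).2.1) hI.2.1
    refine ⟨?_, ihres.2.1, fun n w h => ihres.2.2 n w (hI.2.2 n w h)⟩
    rcases ihres.1 with h | h
    · rw [h]
      exact hI.1
    · exact Or.inr h

lemma pv_expOuter_hit {g : List (Int × List Int)} {lhs c0 : Int} {vs : List Int}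
    {c : Option Int} {nb : PySem.Set Int} {vis : PySem.Dict Int Int}
    (htri : ∀ n w, vis.get? n = some w → w = lhs ∨ w = c0) (hne : c0 ≠ lhs)
    (hhit : ∃ v ∈ vs, ∃ n ∈ pvNbrs g v, vis.get? n = some c0) :
    (pvExpandOuter g lhs vs c nb vis).1 = some c0 := by
  induction vs generalizing c nb vis with
  | nil => obtain ⟨v, hv, _⟩ := hhit; exact absurd hv (List.not_mem_nil)
  | cons v rest ih =>
    have hI := pv_expInner_stable (c0 := c0) (lhs := lhs) (ns := pvNbrs g v)
      (c := c) (nb := nb) htri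
    have hstep : pvExpandOuter g lhs (v::rest) c nb vis
        = pvExpandOuter g lhs rest (pvExpandInner lhs (pvNbrs g v) c nb vis).1
            (pvExpandInner lhs (pvNbrs g v) c nb vis).2.1
            (pvExpandInner lhs (pvNbrs g v) c nb vis).2.2 := rfl
    rw [hstep]
    obtain ⟨u, hu, n, hn, hg⟩ := hhit
    rcases List.mem_cons.mp hu with rfl | hu
    · -- the hit happens inside this inner loop: common becomes some c0 and stays
      have hI1 : (pvExpandInner lhs (pvNbrs g u) c nb vis).1 = some c0 :=
        pv_expInner_hit htri hne ⟨n, hn, hg⟩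
      rw [hI1]
      have hout := pv_expOuter_stable (g := g) (c0 := c0) (vs := rest)
        (c := some c0) (nb := (pvExpandInner lhs (pvNbrs g u) c nb vis).2.1) hI.2.1
      rcases hout.1 with h | h <;> exact h
    · -- the hit vertex is processed later; its visited entry is preserved
      exact ih (c := (pvExpandInner lhs (pvNbrs g v) c nb vis).1)
        (nb := (pvExpandInner lhs (pvNbrs g v) c nb vis).2.1)
        hI.2.1 ⟨u, hu, n, hn, hI.2.2 n c0 hg⟩

lemma pv_expOuter_nohit {g : List (Int × List Int)} {lhs : Int} {vs : List Int}
    {c : Option Int} {nb : PySem.Set Int} {vis : PySem.Dict Int Int}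
    (hno : ∀ v ∈ vs, ∀ n ∈ pvNbrs g v, ∀ w, vis.get? n = some w → w = lhs) :
    (pvExpandOuter g lhs vs c nb vis).1 = c ∧
    (∀ x, (pvExpandOuter g lhs vs c nb vis).2.2.get? x =
      if (∃ v ∈ vs, x ∈ pvNbrs g v) ∧ vis.get? x = none then some lhs else vis.get? x) ∧
    (∀ x, x ∈ (pvExpandOuter g lhs vs c nb vis).2.1 ↔
      x ∈ nb ∨ ((∃ v ∈ vs, x ∈ pvNbrs g v) ∧ vis.get? x = none)) := by
  induction vs generalizing c nb vis with
  | nil => exact ⟨rfl, fun x => by simp [pvExpandOuter], fun x => by simp [pvExpandOuter]⟩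
  | cons v rest ih =>
    have hIv := pv_expInner_nohit (lhs := lhs) (ns := pvNbrs g v) (c := c) (nb := nb)
      (hno v (List.mem_cons_self ..))
    have hno' : ∀ v' ∈ rest, ∀ n ∈ pvNbrs g v', ∀ w,
        (pvExpandInner lhs (pvNbrs g v) c nb vis).2.2.get? n = some w → w = lhs := by
      intro v' hv' n hn w h
      rw [hIv.2.1 n] at h
      by_cases hcond : n ∈ pvNbrs g v ∧ vis.get? n = none
      · rw [if_pos hcond] at h
        exact (Option.some_injective _ h).symm
      · rw [if_neg hcond] at h
        exact hno v' (List.mem_cons_of_mem _ hv') n hn w h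
    have hstep : pvExpandOuter g lhs (v::rest) c nb vis
        = pvExpandOuter g lhs rest (pvExpandInner lhs (pvNbrs g v) c nb vis).1
            (pvExpandInner lhs (pvNbrs g v) c nb vis).2.1
            (pvExpandInner lhs (pvNbrs g v) c nb vis).2.2 := rfl
    rw [hstep]
    have ihres := ih (c := (pvExpandInner lhs (pvNbrs g v) c nb vis).1)
      (nb := (pvExpandInner lhs (pvNbrs g v) c nb vis).2.1) hno'
    refine ⟨by rw [ihres.1, hIv.1], ?_, ?_⟩
    · intro x
      rw [ihres.2.1 x, hIv.2.1 x]
      simp only [List.mem_cons, exists_eq_or_imp]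
      by_cases hm : x ∈ pvNbrs g v <;>
        by_cases hr : ∃ v' ∈ rest, x ∈ pvNbrs g v' <;>
          cases hgx : vis.get? x <;>
            simp [hm, hr, hgx]
    · intro x
      rw [ihres.2.2 x, hIv.2.1 x, hIv.2.2 x]
      simp only [List.mem_cons, exists_eq_or_imp]
      by_cases hm : x ∈ pvNbrs g v <;>
        by_cases hr : ∃ v' ∈ rest, x ∈ pvNbrs g v' <;>
          cases hgx : vis.get? x <;>
            simp [hm, hr, hgx]

-- ---- one round of A's bidirectional loop, seen from the expanding side sl ----
lemma pv_roundA {g : List (Int × List Int)} {sl sr : Int} {rl rr Dt : Nat}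
    {bl : PySem.Set Int} {vis : PySem.Dict Int Int}
    (hsym : ∀ u n, n ∈ pvNbrs g u → u ∈ pvNbrs g n)
    (hD : sr ∈ pvReachN g sl Dt) (hmin : ∀ j, j < Dt → sr ∉ pvReachN g sl j)
    (hbl : ∀ x, x ∈ bl ↔ x ∈ pvReachN g sl rl ∧ ∀ j, j < rl → x ∉ pvReachN g sl j)
    (hvis : ∀ x, vis.get? x = if x ∈ pvReachN g sl rl then some sl
        else if x ∈ pvReachN g sr rr then some sr else none)
    (hrd : rl + rr < Dt) :
    (Dt = rl + rr + 1 → (pvExpandOuter g sl bl none PySem.Set.empty vis).1 = some sr) ∧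
    (Dt ≠ rl + rr + 1 →
      (pvExpandOuter g sl bl none PySem.Set.empty vis).1 = none ∧
      (∀ x, x ∈ (pvExpandOuter g sl bl none PySem.Set.empty vis).2.1 ↔
        x ∈ pvReachN g sl (rl+1) ∧ ∀ j, j < rl+1 → x ∉ pvReachN g sl j) ∧
      (∀ x, (pvExpandOuter g sl bl none PySem.Set.empty vis).2.2.get? x =
        if x ∈ pvReachN g sl (rl+1) then some sl
        else if x ∈ pvReachN g sr rr then some sr else none)) := by
  have hslsr : sl ≠ sr := by
    intro h
    exact hmin 0 (by omega) (pv_mem_ball_zero.2 h.symm)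
  have hdisj : ∀ x a b, a + b < Dt → x ∈ pvReachN g sl a → x ∈ pvReachN g sr b → False :=
    fun x a b hab hxa hxb => hmin (a+b) hab (pv_ball_trans hxa (pv_ball_sym hsym hxb))
  have htri : ∀ n w, vis.get? n = some w → w = sl ∨ w = sr := by
    intro n w h
    rw [hvis n] at h
    by_cases h1 : n ∈ pvReachN g sl rl
    · rw [if_pos h1] at h
      exact Or.inl (Option.some_injective _ h).symm
    · rw [if_neg h1] at h
      by_cases h2 : n ∈ pvReachN g sr rr
      · rw [if_pos h2] at h
        exact Or.inr (Option.some_injective _ h).symm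
      · rw [if_neg h2] at h
        simp at h
  constructor
  · intro hDeq
    have h1 : sr ∈ pvReachN g sl ((rl+1) + rr) := by
      rw [show (rl+1)+rr = Dt by omega]
      exact hD
    obtain ⟨n, hn1, hn2⟩ := pv_ball_decomp h1
    have hnr : n ∈ pvReachN g sr rr := pv_ball_sym hsym hn2
    have hn0 : n ∉ pvReachN g sl rl := fun h => hdisj n rl rr hrd h hnr
    rcases pv_ball_succ.mp hn1 with h' | ⟨u, hu, hnn⟩
    · exact absurd h' hn0
    have husph : u ∈ bl := (hbl u).2 ⟨hu, fun j hj huj =>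
      hn0 (pv_ball_mono (by omega) (pv_ball_succ.2 (Or.inr ⟨u, huj, hnn⟩)))⟩
    have hgn : vis.get? n = some sr := by
      rw [hvis n, if_neg hn0, if_pos hnr]
    exact pv_expOuter_hit htri (fun h => hslsr h.symm) ⟨u, husph, n, hnn, hgn⟩
  · intro hDne
    have hDgt : rl + rr + 1 < Dt := by omega
    have hno : ∀ v ∈ bl, ∀ n ∈ pvNbrs g v, ∀ w, vis.get? n = some w → w = sl := by
      intro v hv n hn w h
      rw [hvis n] at h
      by_cases h1 : n ∈ pvReachN g sl rl
      · rw [if_pos h1] at h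
        exact (Option.some_injective _ h).symm
      · rw [if_neg h1] at h
        by_cases h2 : n ∈ pvReachN g sr rr
        · exfalso
          have hv1 : v ∈ pvReachN g sl rl := ((hbl v).1 hv).1
          exact hdisj n (rl+1) rr (by omega) (pv_ball_succ.2 (Or.inr ⟨v, hv1, hn⟩)) h2
        · rw [if_neg h2] at h
          simp at h
    obtain hres := pv_expOuter_nohit (c := none) (nb := PySem.Set.empty) hno
    refine ⟨hres.1, ?_, ?_⟩
    · intro x
      rw [hres.2.2 x]
      constructor
      · rintro (h | ⟨⟨v, hv, hx⟩, hnone⟩)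
        · exact absurd h (List.not_mem_nil)
        · have ha : x ∉ pvReachN g sl rl := by
            intro hc
            rw [hvis x, if_pos hc] at hnone
            simp at hnone
          refine ⟨pv_ball_succ.2 (Or.inr ⟨v, ((hbl v).1 hv).1, hx⟩), ?_⟩
          intro j hj hxj
          exact ha (pv_ball_mono (by omega) hxj)
      · rintro ⟨hx, hnot⟩
        have hxl : x ∉ pvReachN g sl rl := hnot rl (by omega)
        rcases pv_ball_succ.mp hx with h' | ⟨u, hu, hxn⟩
        · exact absurd h' hxl
        have hub : u ∈ bl := (hbl u).2 ⟨hu, fun j hj huj =>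
          hxl (pv_ball_mono (by omega) (pv_ball_succ.2 (Or.inr ⟨u, huj, hxn⟩)))⟩
        have hxr : x ∉ pvReachN g sr rr := fun h => hdisj x (rl+1) rr (by omega) hx h
        refine Or.inr ⟨⟨u, hub, hxn⟩, ?_⟩
        rw [hvis x, if_neg hxl, if_neg hxr]
    · intro x
      rw [hres.2.1 x]
      by_cases hxl : x ∈ pvReachN g sl rl
      · have hg : vis.get? x = some sl := by rw [hvis x, if_pos hxl]
        rw [hg, if_pos (pv_ball_mono_succ hxl)]
        simp
      · by_cases hxr : x ∈ pvReachN g sr rr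
        · have hg : vis.get? x = some sr := by rw [hvis x, if_neg hxl, if_pos hxr]
          have hx1 : x ∉ pvReachN g sl (rl+1) := fun h => hdisj x (rl+1) rr (by omega) h hxr
          rw [hg, if_neg hx1, if_pos hxr]
          simp
        · have hg : vis.get? x = none := by rw [hvis x, if_neg hxl, if_neg hxr]
          rw [hg]
          have hiff : (∃ v ∈ bl, x ∈ pvNbrs g v) ↔ x ∈ pvReachN g sl (rl+1) := by
            constructor
            · rintro ⟨v, hv, hx⟩
              exact pv_ball_succ.2 (Or.inr ⟨v, ((hbl v).1 hv).1, hx⟩)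
            · intro hx
              rcases pv_ball_succ.mp hx with h' | ⟨u, hu, hxn⟩
              · exact absurd h' hxl
              refine ⟨u, (hbl u).2 ⟨hu, fun j hj huj =>
                hxl (pv_ball_mono (by omega) (pv_ball_succ.2 (Or.inr ⟨u, huj, hxn⟩)))⟩, hxn⟩
          by_cases hx1 : x ∈ pvReachN g sl (rl+1)
          · rw [if_pos ⟨hiff.2 hx1, rfl⟩, if_pos hx1]
          · rw [if_neg (fun hc => hx1 (hiff.1 hc.1)), if_neg hx1, if_neg hxr]

-- ---- reduction helpers for A's loop ----
lemma pv_loopA_step {g : List (Int × List Int)} {v0 v1 : Int} {f : Nat}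
    {b0 b1 : PySem.Set Int} {vis : PySem.Dict Int Int} {dist : Int}
    (hb0 : b0 ≠ []) (hb1 : b1 ≠ []) :
    pvLoopA g v0 v1 (f+1) b0 b1 vis dist none =
      if PySem.Set.len b0 ≤ PySem.Set.len b1 then
        pvLoopA g v0 v1 f (pvExpandLeftBoundary g b0 b1 vis v0).2.1 b1
          (pvExpandLeftBoundary g b0 b1 vis v0).2.2.2 (dist+1)
          (pvExpandLeftBoundary g b0 b1 vis v0).1
      else
        pvLoopA g v0 v1 f b0 (pvExpandLeftBoundary g b1 b0 vis v1).2.1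
          (pvExpandLeftBoundary g b1 b0 vis v1).2.2.2 (dist+1)
          (pvExpandLeftBoundary g b1 b0 vis v1).1 := by
  simp [pvLoopA, hb0, hb1]

lemma pv_loopA_done {g : List (Int × List Int)} {v0 v1 : Int} {f : Nat}
    {b0 b1 : PySem.Set Int} {vis : PySem.Dict Int Int} {dist c : Int}
    (hc : c ≠ 0) :
    pvLoopA g v0 v1 (f+1) b0 b1 vis dist (some c) = dist := by
  simp [pvLoopA, hc]

lemma pvELB_1 {g : List (Int × List Int)} {bl rhs : PySem.Set Int}
    {vis : PySem.Dict Int Int} {lhs : Int} :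
    (pvExpandLeftBoundary g bl rhs vis lhs).1
      = (pvExpandOuter g lhs bl none PySem.Set.empty vis).1 := rfl

lemma pvELB_nb {g : List (Int × List Int)} {bl rhs : PySem.Set Int}
    {vis : PySem.Dict Int Int} {lhs : Int} :
    (pvExpandLeftBoundary g bl rhs vis lhs).2.1
      = (pvExpandOuter g lhs bl none PySem.Set.empty vis).2.1 := rfl

lemma pvELB_vis {g : List (Int × List Int)} {bl rhs : PySem.Set Int}
    {vis : PySem.Dict Int Int} {lhs : Int} :
    (pvExpandLeftBoundary g bl rhs vis lhs).2.2.2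
      = (pvExpandOuter g lhs bl none PySem.Set.empty vis).2.2 := rfl

-- ---- A's while loop returns the BFS distance D ----
lemma pv_loopA_correct {g : List (Int × List Int)} {v0 v1 : Int} {Dt : Nat}
    (hsym : ∀ u n, n ∈ pvNbrs g u → u ∈ pvNbrs g n)
    (h0ne0 : v0 ≠ 0) (h1ne0 : v1 ≠ 0)
    (hD : v1 ∈ pvReachN g v0 Dt) (hmin : ∀ j, j < Dt → v1 ∉ pvReachN g v0 j) :
    ∀ fuel r0 r1 (b0 b1 : PySem.Set Int) (vis : PySem.Dict Int Int),
      (∀ x, x ∈ b0 ↔ x ∈ pvReachN g v0 r0 ∧ ∀ j, j < r0 → x ∉ pvReachN g v0 j) →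
      (∀ x, x ∈ b1 ↔ x ∈ pvReachN g v1 r1 ∧ ∀ j, j < r1 → x ∉ pvReachN g v1 j) →
      (∀ x, vis.get? x = if x ∈ pvReachN g v0 r0 then some v0
          else if x ∈ pvReachN g v1 r1 then some v1 else none) →
      r0 + r1 < Dt → Dt + 1 ≤ fuel + r0 + r1 →
      pvLoopA g v0 v1 fuel b0 b1 vis ((r0 : Int) + (r1 : Int)) none = (Dt : Int) := by
  have hD' : v0 ∈ pvReachN g v1 Dt := pv_ball_sym hsym hD
  have hmin' : ∀ j, j < Dt → v0 ∉ pvReachN g v1 j :=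
    fun j hj h => hmin j hj (pv_ball_sym hsym h)
  intro fuel
  induction fuel with
  | zero => intro r0 r1 b0 b1 vis _ _ _ hrd hfuel; omega
  | succ f ih =>
    intro r0 r1 b0 b1 vis hb0 hb1 hvis hrd hfuel
    have hb0ne : b0 ≠ [] := pv_sphere_ne hb0 hD hmin (by omega)
    have hb1ne : b1 ≠ [] := pv_sphere_ne hb1 hD' hmin' (by omega)
    have hdisj01 : ∀ x, ¬ (x ∈ pvReachN g v0 r0 ∧ x ∈ pvReachN g v1 r1) :=
      fun x ⟨a, b⟩ => hmin (r0+r1) hrd (pv_ball_trans a (pv_ball_sym hsym b))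
    rw [pv_loopA_step hb0ne hb1ne]
    by_cases hlen : PySem.Set.len b0 ≤ PySem.Set.len b1
    · rw [if_pos hlen]
      have round := pv_roundA (sl := v0) (sr := v1) (rl := r0) (rr := r1) (bl := b0)
        (vis := vis) hsym hD hmin hb0 hvis hrd
      by_cases hDeq : Dt = r0 + r1 + 1
      · have hE1 : (pvExpandLeftBoundary g b0 b1 vis v0).1 = some v1 := by
          rw [pvELB_1]; exact round.1 hDeq
        cases f with
        | zero => omega
        | succ f' =>
          rw [hE1, pv_loopA_done h1ne0]
          omega
      · have hs := round.2 hDeq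
        have hE1 : (pvExpandLeftBoundary g b0 b1 vis v0).1 = none := by
          rw [pvELB_1]; exact hs.1
        rw [hE1]
        have hb0' : ∀ x, x ∈ (pvExpandLeftBoundary g b0 b1 vis v0).2.1 ↔
            x ∈ pvReachN g v0 (r0+1) ∧ ∀ j, j < r0+1 → x ∉ pvReachN g v0 j := by
          rw [pvELB_nb]; exact hs.2.1
        have hvis' : ∀ x, (pvExpandLeftBoundary g b0 b1 vis v0).2.2.2.get? x =
            if x ∈ pvReachN g v0 (r0+1) then some v0
            else if x ∈ pvReachN g v1 r1 then some v1 else none := by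
          rw [pvELB_vis]; exact hs.2.2
        have hres := ih (r0+1) r1 (pvExpandLeftBoundary g b0 b1 vis v0).2.1 b1
          (pvExpandLeftBoundary g b0 b1 vis v0).2.2.2 hb0' hb1 hvis'
          (by omega) (by omega)
        have harith : ((r0:Int) + (r1:Int)) + 1 = ((r0+1 : Nat) : Int) + ((r1 : Nat) : Int) := by
          push_cast; ring
        rw [harith]
        exact hres
    · rw [if_neg hlen]
      have hvisSwap : ∀ x, vis.get? x = if x ∈ pvReachN g v1 r1 then some v1
          else if x ∈ pvReachN g v0 r0 then some v0 else none := by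
        intro x
        rw [hvis x]
        by_cases ha : x ∈ pvReachN g v0 r0 <;> by_cases hb : x ∈ pvReachN g v1 r1
        · exact absurd ⟨ha, hb⟩ (hdisj01 x)
        · simp [ha, hb]
        · simp [ha, hb]
        · simp [ha, hb]
      have round := pv_roundA (sl := v1) (sr := v0) (rl := r1) (rr := r0) (bl := b1)
        (vis := vis) hsym hD' hmin' hb1 hvisSwap (by omega)
      by_cases hDeq : Dt = r0 + r1 + 1
      · have hE1 : (pvExpandLeftBoundary g b1 b0 vis v1).1 = some v0 := by
          rw [pvELB_1]; exact round.1 (by omega)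
        cases f with
        | zero => omega
        | succ f' =>
          rw [hE1, pv_loopA_done h0ne0]
          omega
      · have hs := round.2 (by omega)
        have hE1 : (pvExpandLeftBoundary g b1 b0 vis v1).1 = none := by
          rw [pvELB_1]; exact hs.1
        rw [hE1]
        have hb1' : ∀ x, x ∈ (pvExpandLeftBoundary g b1 b0 vis v1).2.1 ↔
            x ∈ pvReachN g v1 (r1+1) ∧ ∀ j, j < r1+1 → x ∉ pvReachN g v1 j := by
          rw [pvELB_nb]; exact hs.2.1
        have hvisBack : ∀ x, (pvExpandLeftBoundary g b1 b0 vis v1).2.2.2.get? x =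
            if x ∈ pvReachN g v0 r0 then some v0
            else if x ∈ pvReachN g v1 (r1+1) then some v1 else none := by
          intro x
          rw [pvELB_vis, hs.2.2 x]
          by_cases ha : x ∈ pvReachN g v0 r0 <;> by_cases hb : x ∈ pvReachN g v1 (r1+1)
          · exact absurd (pv_ball_trans ha (pv_ball_sym hsym hb))
              (hmin (r0+(r1+1)) (by omega))
          · simp [ha, hb]
          · simp [ha, hb]
          · simp [ha, hb]
        have hres := ih r0 (r1+1) b0 (pvExpandLeftBoundary g b1 b0 vis v1).2.1
          (pvExpandLeftBoundary g b1 b0 vis v1).2.2.2 hb0 hb1' hvisBack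
          (by omega) (by omega)
        have harith : ((r0:Int) + (r1:Int)) + 1 = ((r0 : Nat) : Int) + ((r1+1 : Nat) : Int) := by
          push_cast; ring
        rw [harith]
        exact hres

-- ---- top-level: A returns D ----
lemma pv_A_eq {g : List (Int × List Int)} {v0 v1 : Int} {Dt : Nat}
    (hsym : ∀ u n, n ∈ pvNbrs g u → u ∈ pvNbrs g n)
    (hv01 : v0 ≠ v1) (h0ne0 : v0 ≠ 0) (h1ne0 : v1 ≠ 0)
    (hD : v1 ∈ pvReachN g v0 Dt) (hmin : ∀ j, j < Dt → v1 ∉ pvReachN g v0 j)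
    (hlen : Dt ≤ g.length) :
    double_sided_breadth_first_search g v0 v1 = (Dt : Int) := by
  have hDpos : 0 < Dt := by
    rcases Nat.eq_zero_or_pos Dt with h | h
    · exact absurd (pv_mem_ball_zero.mp (h ▸ hD)).symm hv01
    · exact h
  have hvis0 : ∀ x, (PySem.Dict.ofList [(v0, v0), (v1, v1)]).get? x =
      if x ∈ pvReachN g v0 0 then some v0
      else if x ∈ pvReachN g v1 0 then some v1 else none := by
    intro x
    have hofl : PySem.Dict.ofList [(v0, v0), (v1, v1)]
        = (PySem.Dict.empty.insert v0 v0).insert v1 v1 := rfl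
    rw [hofl, PySem.Dict.get?_insert, PySem.Dict.get?_insert]
    by_cases h0 : x = v0
    · subst h0
      rw [if_neg hv01, if_pos rfl, if_pos (pv_mem_ball_zero.2 rfl)]
    · by_cases h1 : x = v1
      · subst h1
        rw [if_pos rfl, if_neg (fun h => h0 (pv_mem_ball_zero.mp h)),
          if_pos (pv_mem_ball_zero.2 rfl)]
      · rw [if_neg h1, if_neg h0, PySem.Dict.get?_empty,
          if_neg (fun h => h0 (pv_mem_ball_zero.mp h)),
          if_neg (fun h => h1 (pv_mem_ball_zero.mp h))]
  have hb0 : ∀ x, x ∈ PySem.Set.ofList [v0] ↔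
      x ∈ pvReachN g v0 0 ∧ ∀ j, j < 0 → x ∉ pvReachN g v0 j := by
    intro x
    simp [PySem.Set.mem_ofList, pv_mem_ball_zero]
  have hb1 : ∀ x, x ∈ PySem.Set.ofList [v1] ↔
      x ∈ pvReachN g v1 0 ∧ ∀ j, j < 0 → x ∉ pvReachN g v1 j := by
    intro x
    simp [PySem.Set.mem_ofList, pv_mem_ball_zero]
  have hres := pv_loopA_correct hsym h0ne0 h1ne0 hD hmin (g.length + 1) 0 0
    (PySem.Set.ofList [v0]) (PySem.Set.ofList [v1])
    (PySem.Dict.ofList [(v0, v0), (v1, v1)]) hb0 hb1 hvis0 (by omega) (by omega)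
  simpa [double_sided_breadth_first_search] using hres

-- ---- top-level: B returns D ----
lemma pv_alt_eq {g : List (Int × List Int)} {v0 v1 : Int} {Dt : Nat}
    (hv01 : v0 ≠ v1)
    (hD : v1 ∈ pvReachN g v0 Dt) (hmin : ∀ j, j < Dt → v1 ∉ pvReachN g v0 j)
    (hlen : Dt ≤ g.length) :
    double_sided_breadth_first_search_alt g v0 v1 = (Dt : Int) := by
  have hDpos : 0 < Dt := by
    rcases Nat.eq_zero_or_pos Dt with h | h
    · exact absurd (pv_mem_ball_zero.mp (h ▸ hD)).symm hv01
    · exact h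
  have hV : ∀ x, x ∈ PySem.Set.ofList [v0] ↔ x ∈ pvReachN g v0 0 := by
    intro x
    simp [PySem.Set.mem_ofList, pv_mem_ball_zero]
  have hF : ∀ x, x ∈ PySem.Set.ofList [v0] ↔
      x ∈ pvReachN g v0 0 ∧ ∀ j, j < 0 → x ∉ pvReachN g v0 j := by
    intro x
    simp [PySem.Set.mem_ofList, pv_mem_ball_zero]
  have hres := pv_loopB_correct hD hmin (g.length + 1) 0
    (PySem.Set.ofList [v0]) (PySem.Set.ofList [v0]) hV hF hDpos (by omega)
  simpa [double_sided_breadth_first_search_alt] using hres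


-- ---- the direct-edge case: vertex1 listed as a neighbour of vertex0 ----
lemma pv_A_eq_direct {g : List (Int × List Int)} {v0 v1 : Int}
    (hv01 : v0 ≠ v1) (h1ne0 : v1 ≠ 0) (hn : v1 ∈ pvNbrs g v0) :
    double_sided_breadth_first_search g v0 v1 = 1 := by
  obtain ⟨l, hget, -⟩ := pv_nbrs_mem hn
  have hgne : g ≠ [] := by
    intro h
    subst h
    rw [show pvAdj ([] : List (Int × List Int)) = PySem.Dict.empty from rfl,
      PySem.Dict.get?_empty] at hget
    simp at hget
  obtain ⟨m, hm⟩ : ∃ m, g.length = m + 1 :=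
    ⟨g.length - 1, by have := List.length_pos_of_ne_nil hgne; omega⟩
  have hofl : PySem.Dict.ofList [(v0, v0), (v1, v1)]
      = (PySem.Dict.empty.insert v0 v0).insert v1 v1 := rfl
  have hg1 : (PySem.Dict.ofList [(v0, v0), (v1, v1)]).get? v1 = some v1 := by
    rw [hofl, PySem.Dict.get?_insert, if_pos rfl]
  have htri : ∀ n w, (PySem.Dict.ofList [(v0, v0), (v1, v1)]).get? n = some w →
      w = v0 ∨ w = v1 := by
    intro n w h
    rw [hofl, PySem.Dict.get?_insert] at h
    by_cases h1 : n = v1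
    · rw [if_pos h1] at h
      exact Or.inr (Option.some_injective _ h).symm
    · rw [if_neg h1, PySem.Dict.get?_insert] at h
      by_cases h0 : n = v0
      · rw [if_pos h0] at h
        exact Or.inl (Option.some_injective _ h).symm
      · rw [if_neg h0, PySem.Dict.get?_empty] at h
        simp at h
  have hs0 : PySem.Set.ofList [v0] = [v0] := rfl
  have hs1 : PySem.Set.ofList [v1] = [v1] := rfl
  unfold double_sided_breadth_first_search
  rw [hm, hs0, hs1]
  rw [pv_loopA_step (List.cons_ne_nil _ _) (List.cons_ne_nil _ _)]
  rw [if_pos (show PySem.Set.len [v0] ≤ PySem.Set.len [v1] from by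
    simp [PySem.Set.len])]
  have hEth : (pvExpandLeftBoundary g [v0] [v1]
      (PySem.Dict.ofList [(v0, v0), (v1, v1)]) v0).1 = some v1 := by
    rw [pvELB_1]
    exact pv_expOuter_hit htri (fun h => hv01 h.symm)
      ⟨v0, List.mem_cons_self .., v1, hn, hg1⟩
  rw [hEth, pv_loopA_done h1ne0]
  norm_num

lemma pv_alt_eq_direct {g : List (Int × List Int)} {v0 v1 : Int}
    (hv01 : v0 ≠ v1) (hn : v1 ∈ pvNbrs g v0) :
    double_sided_breadth_first_search_alt g v0 v1 = 1 := by
  have hv1m : v1 ∉ PySem.Set.ofList [v0] := by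
    intro h
    rw [PySem.Set.mem_ofList] at h
    exact hv01 (List.mem_singleton.mp h).symm
  have hs0 : PySem.Set.ofList [v0] = [v0] := rfl
  rw [hs0] at hv1m
  have houter : pvBfsOuter g v1 [v0] [v0] ([] : PySem.Set Int) = none :=
    (pv_bfsOuter_none_iff hv1m).2 ⟨v0, List.mem_cons_self .., hn⟩
  unfold double_sided_breadth_first_search_alt
  rw [hs0]
  simp [pvLoopB, houter]

-- ===== VERDICT (by name: the statement is the Claim_ definition above) =====
theorem double_sided_breadth_first_search_spec : Claim_equal_double_sided_breadth_first_search := by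
  intro undirected_graph vertex0 vertex1 _dom pre
  unfold Spec_double_sided_breadth_first_search
  obtain ⟨hv01, h1ne0, hcase⟩ := pre
  rcases hcase with hn | ⟨h0ne0, -, -, hclose, hconn⟩
  · rw [pv_A_eq_direct hv01 h1ne0 hn, pv_alt_eq_direct hv01 hn]
  · have hsym := pv_pre_sym hclose
    have hex : ∃ k, vertex1 ∈ pvReachN undirected_graph vertex0 k :=
      ⟨undirected_graph.length, hconn⟩
    have hD := Nat.find_spec hex
    have hmin : ∀ j, j < Nat.find hex → vertex1 ∉ pvReachN undirected_graph vertex0 j :=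
      fun j hj => Nat.find_min hex hj
    have hlen : Nat.find hex ≤ undirected_graph.length :=
      Nat.find_min' hex hconn
    rw [pv_A_eq hsym hv01 h0ne0 h1ne0 hD hmin hlen, pv_alt_eq hv01 hD hmin hlen]
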